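-- pv_equiv track=rewrite | github.com/MrBrantCode/unitest_baseline | mut_generate/mist_train_taco/taco_16693/solution.py | find_shortest_non_subsequence
-- ===== SOURCE A (Python) =====
-- def find_shortest_non_subsequence(A: str) -> str:
--     alpha = 'abcdefghijklmnopqrstuvwxyz'
--     l = len(A)
--     alpha2 = {j: i for (i, j) in enumerate(alpha)}
--     memo = [[0] * 26 for _ in range(l, -1, -1)]
--
--     for i in range(26):
--         memo[l][i] = l + 1
--
--     for (x, y) in alpha2.items():
--         for i in range(l - 1, -1, -1):
--             if A[i] == x:
--                 memo[i][y] = i + 1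
--             else:
--                 memo[i][y] = memo[i + 1][y]
--
--     search = [1] * (l + 2)
--     search[l + 1] = 0
--
--     for i in range(l - 1, -1, -1):
--         m = max([memo[i][j] for j in range(26)])
--         if m != l + 1:
--             search[i] = search[m] + 1
--
--     (n, seq) = (0, 0)
--     ans_len = search[0]
--     ans = ''
--     temp = 0
--
--     for i in range(ans_len):
--         for j in range(26):
--             n = memo[temp][j]
--             seq = search[n] + i
--             if seq + 1 == ans_len:
--                 ans += alpha[j]
--                 temp = memo[temp][j]
--                 break
--
--     return ans
-- ===== SOURCE B (Python) =====
-- def find_shortest_non_subsequence(A: str) -> str: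
--     # Single right-to-left pass: dp[pos] = lexicographically-smallest shortest
--     # string that is not a subsequence of A[pos:], built directly as strings,
--     # with nxt[c] = first index >= pos holding character c.
--     alpha = 'abcdefghijklmnopqrstuvwxyz'
--     l = len(A)
--     nxt = {}
--     dp = [''] * (l + 1)
--     for pos in range(l, -1, -1):
--         if pos < l:
--             nxt[A[pos]] = pos
--         best = ''
--         for c in alpha:
--             if c in nxt:
--                 cand = c + dp[nxt[c] + 1]
--             else:
--                 cand = c
--             if best == '' or (len(cand), cand) < (len(best), best):
--                 best = cand
--         dp[pos] = best
--     return dp[0]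
-- ===== Notes on version B (the rewrite author's own statement) =====
-- stated objective: alternative
-- what changed: Replaces A's three phases (a 26x(n+1) first-occurrence table, a separate suffix-length DP using a max trick, and a greedy reconstruction loop over that table) by a single right-to-left pass that maintains a next-occurrence map and directly builds, for every suffix, the lexicographically-smallest shortest non-subsequence as a string.
import Mathlib
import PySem

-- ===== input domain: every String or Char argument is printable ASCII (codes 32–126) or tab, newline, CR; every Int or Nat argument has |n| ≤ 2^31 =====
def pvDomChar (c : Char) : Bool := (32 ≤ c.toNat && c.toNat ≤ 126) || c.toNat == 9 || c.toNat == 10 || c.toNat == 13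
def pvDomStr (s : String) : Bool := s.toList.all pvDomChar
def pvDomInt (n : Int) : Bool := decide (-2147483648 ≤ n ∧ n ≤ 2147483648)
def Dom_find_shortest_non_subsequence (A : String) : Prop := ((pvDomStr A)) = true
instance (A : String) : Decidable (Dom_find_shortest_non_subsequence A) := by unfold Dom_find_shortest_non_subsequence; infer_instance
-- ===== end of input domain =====

-- B replaces A's table DP + length DP + reconstruction by one right-to-left pass with a
-- next-occurrence map that builds the answer strings directly; same return value, proved equal.


-- ===== PORT A =====
-- shared constant: the alphabet string both Pythons write out
def pvAlpha : List Char := "abcdefghijklmnopqrstuvwxyz".toList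

-- list assignment xs[i] = v; exact for the non-negative in-range indices these loops produce
def pvSet {α : Type} (xs : List α) (i : Int) (v : α) : List α := xs.set i.toNat v

-- memo[i][j] read / write (always in range in A's loops; default never surfaces)
def pvGet2 (m : List (List Int)) (i j : Int) : Int :=
  (PySem.List.pyGet? ((PySem.List.pyGet? m i).getD []) j).getD 0
def pvSet2 (m : List (List Int)) (i j : Int) (v : Int) : List (List Int) :=
  pvSet m i (pvSet ((PySem.List.pyGet? m i).getD []) j v)
def pvGet1 (xs : List Int) (i : Int) : Int := (PySem.List.pyGet? xs i).getD 0

-- the inner 'for j in range(26): … break' of A's reconstruction loop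
def pvScan (memo : List (List Int)) (search : List Int) (ansLen i : Int) :
    List Int → Int × Int × List Char × Int → Int × Int × List Char × Int
  | [], st => st
  | j :: rest, (_, _, ans, temp) =>
    let n := pvGet2 memo temp j
    let seq := pvGet1 search n + i
    if seq + 1 = ansLen then
      (n, seq, ans ++ [(PySem.List.pyGet? pvAlpha j).getD ' '], pvGet2 memo temp j)
    else
      pvScan memo search ansLen i rest (n, seq, ans, temp)

def find_shortest_non_subsequence (A : String) : String :=
  let cs := A.toList
  let l : Int := cs.length
  let alpha2 : PySem.Dict Char Int :=
    (PySem.List.enumerate pvAlpha).foldl (fun d p => d.insert p.2 p.1) PySem.Dict.empty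
  let memo : List (List Int) :=
    (PySem.List.pyRange l (-1) (-1)).map (fun _ => List.replicate 26 (0 : Int))
  let memo := (PySem.List.pyRange 0 26 1).foldl (fun memo i => pvSet2 memo l i (l + 1)) memo
  let memo := alpha2.items.foldl (fun memo xy =>
    (PySem.List.pyRange (l - 1) (-1) (-1)).foldl (fun memo i =>
      if (PySem.List.pyGet? cs i).getD ' ' = xy.1 then
        pvSet2 memo i xy.2 (i + 1)
      else
        pvSet2 memo i xy.2 (pvGet2 memo (i + 1) xy.2)) memo) memo
  let search : List Int := List.replicate (l + 2).toNat 1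
  let search := pvSet search (l + 1) 0
  let search := (PySem.List.pyRange (l - 1) (-1) (-1)).foldl (fun search i =>
    let m := (PySem.List.max? ((PySem.List.pyRange 0 26 1).map (fun j => pvGet2 memo i j)) (fun x => x)).getD 0
    if m ≠ l + 1 then pvSet search i (pvGet1 search m + 1) else search) search
  let ansLen := pvGet1 search 0
  let st :=
    (PySem.List.pyRange 0 ansLen 1).foldl (fun st i =>
      pvScan memo search ansLen i (PySem.List.pyRange 0 26 1) st)
      ((0 : Int), (0 : Int), ([] : List Char), (0 : Int))
  String.ofList st.2.2.1

-- ===== PORT B =====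
-- B-side helper: Python's tuple comparison (len(s), s) < (len(t), t) on strings, over lists of chars
def pvLexLt : List Char → List Char → Bool
  | _, [] => false
  | [], _ :: _ => true
  | a :: as, b :: bs => if a = b then pvLexLt as bs else decide (a < b)
def pvKeyLt (x y : List Char) : Bool :=
  decide (x.length < y.length) || (x.length == y.length && pvLexLt x y)

def find_shortest_non_subsequence_alt (A : String) : String :=
  let cs := A.toList
  let l : Int := cs.length
  let st :=
    (PySem.List.pyRange l (-1) (-1)).foldl (fun st pos =>
      let nxt := if pos < l then st.1.insert ((PySem.List.pyGet? cs pos).getD ' ') pos else st.1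
      let dp := st.2
      let best := pvAlpha.foldl (fun best c =>
        let cand : List Char :=
          match nxt.get? c with
          | some k => c :: (PySem.List.pyGet? dp (k + 1)).getD []
          | none => [c]
        if best == [] || pvKeyLt cand best then cand else best) []
      (nxt, pvSet dp pos best))
      ((PySem.Dict.empty : PySem.Dict Char Int), List.replicate (l + 1).toNat ([] : List Char))
  String.ofList ((PySem.List.pyGet? st.2 0).getD [])

-- ===== PRECONDITION & SPEC =====
def Spec_find_shortest_non_subsequence (A : String) (out : String) : Prop := out = find_shortest_non_subsequence_alt A
instance (A : String) (out : String) : Decidable (Spec_find_shortest_non_subsequence A out) := by unfold Spec_find_shortest_non_subsequence; infer_instance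

-- ===== CLAIM (what is proved, stated in full; the proofs are below) =====
def Claim_equal_find_shortest_non_subsequence : Prop := ∀ (A : String), Dom_find_shortest_non_subsequence A → Spec_find_shortest_non_subsequence A (find_shortest_non_subsequence A)

-- ===== LEMMAS AND PROOFS =====

-- ---- the common value: lexicographically-smallest shortest non-subsequence, fuel-indexed ----
def pvSpecF : Nat → List Char → List Char
  | 0, _ => []
  | f + 1, u =>
    pvAlpha.foldl (fun best c =>
      let cand : List Char :=
        match u.idxOf? c with
        | some j => c :: pvSpecF f (u.drop (j + 1))
        | none => [c]
      if best == [] || pvKeyLt cand best then cand else best) []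

def pvSpec (u : List Char) : List Char := pvSpecF (u.length + 1) u

def pvCand (u : List Char) (c : Char) : List Char :=
  match u.idxOf? c with
  | some j => c :: pvSpec (u.drop (j + 1))
  | none => [c]

def pvN (cs : List Char) (k : Nat) (c : Char) : Nat :=
  match (cs.drop k).idxOf? c with
  | some j => k + j + 1
  | none => cs.length + 1

def pvF (cs : List Char) (k : Nat) : Nat :=
  if k ≤ cs.length then (pvSpec (cs.drop k)).length else 0

def pvG (cs : List Char) (k : Nat) (c : Char) : Nat := pvF cs (pvN cs k c)

def pvCj (j : Nat) : Char := pvAlpha.getD j ' '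

def pvIsMin (f : Char → List Char) (L : List Char) (r : List Char) : Prop :=
  (∃ c ∈ L, r = f c) ∧ ∀ c ∈ L, pvKeyLt (f c) r = false

-- ---- order lemmas for the comparison key ----
lemma pvLexLt_irrefl (x : List Char) : pvLexLt x x = false := by
  induction x with
  | nil => rfl
  | cons a as ih => simp [pvLexLt, ih]

lemma pvLexLt_trans {x y z : List Char} (h1 : pvLexLt x y = true) (h2 : pvLexLt y z = true) :
    pvLexLt x z = true := by
  induction x generalizing y z with
  | nil =>
    cases y with
    | nil => cases z with | nil => exact h2 | cons b bs => simp [pvLexLt]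
    | cons a as =>
      cases z with
      | nil => simp [pvLexLt] at h2
      | cons b bs => simp [pvLexLt]
  | cons a as ih =>
    cases y with
    | nil => simp [pvLexLt] at h1
    | cons b bs =>
      cases z with
      | nil => simp [pvLexLt] at h2
      | cons d ds =>
        simp only [pvLexLt] at h1 h2 ⊢
        by_cases hab : a = b
        · subst hab
          rw [if_pos rfl] at h1
          by_cases had : a = d
          · subst had
            rw [if_pos rfl] at h2 ⊢
            exact ih h1 h2
          · rw [if_neg had] at h2 ⊢; exact h2
        · simp only [if_neg hab] at h1
          by_cases hbd : b = d
          · subst hbd; simp only [if_neg hab]; exact h1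
          · simp only [if_neg hbd] at h2
            have : a < d := lt_trans (of_decide_eq_true h1) (of_decide_eq_true h2)
            have had : a ≠ d := ne_of_lt this
            simp [if_neg had, this]

lemma pvLexLt_total {x y : List Char} (h : x ≠ y) :
    pvLexLt x y = true ∨ pvLexLt y x = true := by
  induction x generalizing y with
  | nil =>
    cases y with
    | nil => exact absurd rfl h
    | cons b bs => left; simp [pvLexLt]
  | cons a as ih =>
    cases y with
    | nil => right; simp [pvLexLt]
    | cons b bs =>
      by_cases hab : a = b
      · subst hab
        have hne : as ≠ bs := by intro hh; exact h (by rw [hh])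
        rcases ih hne with h1 | h1
        · left; simpa [pvLexLt] using h1
        · right; simpa [pvLexLt] using h1
      · rcases lt_or_gt_of_ne hab with hlt | hgt
        · left; simp [pvLexLt, if_neg hab, hlt]
        · right; simp [pvLexLt, if_neg (Ne.symm hab), hgt]

lemma pvKeyLt_irrefl (x : List Char) : pvKeyLt x x = false := by
  simp [pvKeyLt, pvLexLt_irrefl]

lemma pvKeyLt_trans {x y z : List Char} (h1 : pvKeyLt x y = true) (h2 : pvKeyLt y z = true) :
    pvKeyLt x z = true := by
  simp only [pvKeyLt, Bool.or_eq_true, Bool.and_eq_true, decide_eq_true_eq, beq_iff_eq] at h1 h2 ⊢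
  rcases h1 with h1 | ⟨h1e, h1l⟩ <;> rcases h2 with h2 | ⟨h2e, h2l⟩
  · exact Or.inl (lt_trans h1 h2)
  · exact Or.inl (h2e ▸ h1)
  · exact Or.inl (h1e ▸ h2)
  · exact Or.inr ⟨h1e.trans h2e, pvLexLt_trans h1l h2l⟩

lemma pvKeyLt_total {x y : List Char} (h : x ≠ y) :
    pvKeyLt x y = true ∨ pvKeyLt y x = true := by
  simp only [pvKeyLt, Bool.or_eq_true, Bool.and_eq_true, decide_eq_true_eq, beq_iff_eq]
  rcases lt_trichotomy x.length y.length with hl | hl | hl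
  · exact Or.inl (Or.inl hl)
  · rcases pvLexLt_total h with h1 | h1
    · exact Or.inl (Or.inr ⟨hl, h1⟩)
    · exact Or.inr (Or.inr ⟨hl.symm, h1⟩)
  · exact Or.inr (Or.inl hl)

lemma pvKeyLt_false_len {x y : List Char} (h : pvKeyLt x y = false) : y.length ≤ x.length := by
  simp only [pvKeyLt, Bool.or_eq_false_iff, decide_eq_false_iff_not, not_lt] at h
  exact h.1

-- ---- the min-fold both programs run ----
lemma pvFoldMin_go (f : Char → List Char) (hne : ∀ c, f c ≠ []) :
    ∀ (L P : List Char) (acc : List Char), pvIsMin f P acc → acc ≠ [] →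
      pvIsMin f (P ++ L)
        (L.foldl (fun best c => if best == [] || pvKeyLt (f c) best then f c else best) acc) := by
  intro L
  induction L with
  | nil => intro P acc h _; simpa using h
  | cons c L ih =>
    intro P acc h hneacc
    rw [List.foldl_cons]
    have hbeq : (acc == ([] : List Char)) = false := by simp [hneacc]
    have hred : (if acc == [] || pvKeyLt (f c) acc then f c else acc) =
        (if pvKeyLt (f c) acc = true then f c else acc) := by
      rw [hbeq, Bool.false_or]
    rw [hred]
    have h1 : pvIsMin f (P ++ [c]) (if pvKeyLt (f c) acc = true then f c else acc) := by
      by_cases hk : pvKeyLt (f c) acc = true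
      · rw [if_pos hk]
        refine ⟨⟨c, by simp, rfl⟩, ?_⟩
        intro c' hc'
        rcases List.mem_append.mp hc' with hc' | hc'
        · by_cases he : pvKeyLt (f c') (f c) = true
          · exact absurd (pvKeyLt_trans he hk) (by simp [h.2 c' hc'])
          · exact Bool.eq_false_iff.mpr (by simp [he])
        · simp only [List.mem_singleton] at hc'
          subst hc'
          exact pvKeyLt_irrefl _
      · have hkf : pvKeyLt (f c) acc = false := Bool.eq_false_iff.mpr hk
        rw [if_neg hk]
        refine ⟨⟨h.1.choose, List.mem_append.mpr (Or.inl h.1.choose_spec.1), h.1.choose_spec.2⟩, ?_⟩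
        intro c' hc'
        rcases List.mem_append.mp hc' with hc' | hc'
        · exact h.2 c' hc'
        · simp only [List.mem_singleton] at hc'
          subst hc'
          exact hkf
    have hne1 : (if pvKeyLt (f c) acc = true then f c else acc) ≠ [] := by
      by_cases hk : pvKeyLt (f c) acc = true
      · rw [if_pos hk]; exact hne c
      · rw [if_neg hk]; exact hneacc
    have := ih (P ++ [c]) _ h1 hne1
    simpa [List.append_assoc] using this

lemma pvFoldMin (f : Char → List Char) (hne : ∀ c, f c ≠ []) (L : List Char) (hL : L ≠ []) :
    pvIsMin f L (L.foldl (fun best c => if best == [] || pvKeyLt (f c) best then f c else best) []) := by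
  cases L with
  | nil => exact absurd rfl hL
  | cons c L =>
    rw [List.foldl_cons]
    have hstep : (if ([] : List Char) == [] || pvKeyLt (f c) [] then f c else []) = f c := by
      simp
    rw [hstep]
    have h0 : pvIsMin f [c] (f c) := ⟨⟨c, by simp, rfl⟩, by
      intro c' hc'
      simp only [List.mem_singleton] at hc'
      subst hc'
      exact pvKeyLt_irrefl _⟩
    have := pvFoldMin_go f hne L [c] (f c) h0 (hne c)
    simpa using this

lemma pvIsMin_unique {f : Char → List Char} {L r₁ r₂ : List Char}
    (h1 : pvIsMin f L r₁) (h2 : pvIsMin f L r₂) : r₁ = r₂ := by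
  by_contra hne
  rcases h1.1 with ⟨c1, hc1, hv1⟩
  rcases h2.1 with ⟨c2, hc2, hv2⟩
  rcases pvKeyLt_total hne with h | h
  · have := h2.2 c1 hc1
    rw [← hv1] at this
    rw [this] at h
    exact Bool.false_ne_true h
  · have := h1.2 c2 hc2
    rw [← hv2] at this
    rw [this] at h
    exact Bool.false_ne_true h

-- ---- pvSpec facts ----
lemma pvCand_ne_nil (u : List Char) (c : Char) : pvCand u c ≠ [] := by
  unfold pvCand
  cases h : u.idxOf? c <;> simp

lemma pvCand_head (u : List Char) (c : Char) : ∃ t, pvCand u c = c :: t := by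
  unfold pvCand
  cases h : u.idxOf? c
  · exact ⟨[], rfl⟩
  · exact ⟨_, rfl⟩

lemma pvSpecF_congr : ∀ (n₁ : Nat) (u : List Char) (n₂ : Nat), u.length < n₁ → u.length < n₂ →
    pvSpecF n₁ u = pvSpecF n₂ u := by
  intro n₁
  induction n₁ with
  | zero => intro u n₂ h1 _; omega
  | succ f₁ ih =>
    intro u n₂ h1 h2
    cases n₂ with
    | zero => omega
    | succ f₂ =>
      simp only [pvSpecF]
      apply List.foldl_ext
      intro b c _
      cases h : u.idxOf? c with
      | none => simp
      | some j =>
        rcases List.idxOf?_eq_some_iff.mp h with ⟨hj, _, _⟩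
        have hd : (u.drop (j + 1)).length < u.length := by
          rw [List.length_drop]; omega
        simp [ih (u.drop (j + 1)) f₂ (by omega) (by omega)]

lemma pvSpec_isMin (u : List Char) : pvIsMin (pvCand u) pvAlpha (pvSpec u) := by
  have hcand : ∀ c, (match u.idxOf? c with
      | some j => c :: pvSpecF u.length (u.drop (j + 1))
      | none => [c]) = pvCand u c := by
    intro c
    unfold pvCand
    cases h : u.idxOf? c with
    | none => rfl
    | some j =>
      rcases List.idxOf?_eq_some_iff.mp h with ⟨hj, _, _⟩
      have hd : (u.drop (j + 1)).length < u.length := by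
        rw [List.length_drop]; omega
      show c :: pvSpecF u.length (u.drop (j + 1)) = c :: pvSpec (u.drop (j + 1))
      rw [pvSpecF_congr u.length (u.drop (j + 1)) ((u.drop (j + 1)).length + 1) (by omega) (by omega)]
      rfl
  have hfold : pvSpec u = pvAlpha.foldl
      (fun best c => if best == [] || pvKeyLt (pvCand u c) best then pvCand u c else best) [] := by
    show pvSpecF (u.length + 1) u = _
    simp only [pvSpecF]
    apply List.foldl_ext
    intro b c _
    simp only [hcand]
  rw [hfold]
  exact pvFoldMin _ (pvCand_ne_nil u) pvAlpha (by decide)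

lemma pvSpec_ne_nil (u : List Char) : pvSpec u ≠ [] := by
  rcases (pvSpec_isMin u).1 with ⟨c, _, hv⟩
  rw [hv]
  exact pvCand_ne_nil u c

lemma pvSpec_len_le (u : List Char) {c : Char} (hc : c ∈ pvAlpha) :
    (pvSpec u).length ≤ (pvCand u c).length := by
  exact pvKeyLt_false_len ((pvSpec_isMin u).2 c hc)

lemma pvSpec_len_cons (d : Char) (t : List Char) :
    (pvSpec t).length ≤ (pvSpec (d :: t)).length := by
  rcases (pvSpec_isMin (d :: t)).1 with ⟨c, hc, hv⟩
  rw [hv]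
  have hle := pvSpec_len_le t hc
  cases h : (d :: t).idxOf? c with
  | none =>
    have hnot : c ∉ d :: t := List.idxOf?_eq_none_iff.mp h
    have ht : t.idxOf? c = none := List.idxOf?_eq_none_iff.mpr (fun hm => hnot (List.mem_cons_of_mem d hm))
    have h1 : pvCand t c = [c] := by unfold pvCand; rw [ht]
    have h2 : pvCand (d :: t) c = [c] := by unfold pvCand; rw [h]
    rw [h2]
    rw [h1] at hle
    simpa using hle
  | some j =>
    rw [List.idxOf?_cons] at h
    by_cases hd : d = c
    · have hb : (d == c) = true := beq_iff_eq.mpr hd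
      rw [if_pos hb] at h
      cases h
      have h2 : pvCand (d :: t) c = c :: pvSpec t := by
        unfold pvCand
        rw [List.idxOf?_cons, if_pos hb]
        rfl
      rw [h2]
      simp
    · have hb : (d == c) = false := beq_eq_false_iff_ne.mpr hd
      rw [hb] at h
      simp only [Bool.false_eq_true, if_false, Option.map_eq_some_iff] at h
      rcases h with ⟨j', hj', rfl⟩
      have h2 : pvCand (d :: t) c = c :: pvSpec (t.drop (j' + 1)) := by
        unfold pvCand
        rw [List.idxOf?_cons, hb]
        simp only [Bool.false_eq_true, if_false, hj', Option.map_some]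
        rfl
      have h1 : pvCand t c = c :: pvSpec (t.drop (j' + 1)) := by
        unfold pvCand
        rw [hj']
      rw [h2]
      rw [h1] at hle
      exact hle

-- ---- pvN facts ----
lemma pvN_ge' (cs : List Char) (k : Nat) (c : Char) (hk : k ≤ cs.length) : k + 1 ≤ pvN cs k c := by
  unfold pvN
  cases h : (cs.drop k).idxOf? c <;> simp <;> omega

lemma pvN_le (cs : List Char) (k : Nat) (c : Char) : pvN cs k c ≤ cs.length + 1 := by
  unfold pvN
  cases h : (cs.drop k).idxOf? c with
  | none => simp
  | some j =>
    rcases List.idxOf?_eq_some_iff.mp h with ⟨hj, _, _⟩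
    rw [List.length_drop] at hj
    simp
    omega

lemma pvN_of_ge (cs : List Char) (k : Nat) (c : Char) (hk : cs.length ≤ k) :
    pvN cs k c = cs.length + 1 := by
  unfold pvN
  rw [List.drop_eq_nil_of_le hk]
  rfl

lemma pvN_step_eq (cs : List Char) (k : Nat) (c : Char) (hk : k < cs.length) (h : cs[k] = c) :
    pvN cs k c = k + 1 := by
  unfold pvN
  rw [List.drop_eq_getElem_cons hk, List.idxOf?_cons, if_pos (beq_iff_eq.mpr h)]

lemma pvN_step_ne (cs : List Char) (k : Nat) (c : Char) (hk : k < cs.length) (h : cs[k] ≠ c) :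
    pvN cs k c = pvN cs (k + 1) c := by
  unfold pvN
  rw [List.drop_eq_getElem_cons hk, List.idxOf?_cons, if_neg (by simp [h])]
  cases h2 : (cs.drop (k + 1)).idxOf? c <;> simp [h2] <;> omega

lemma pvCand_drop_eq (cs : List Char) (k : Nat) (c : Char) :
    pvCand (cs.drop k) c =
      if pvN cs k c ≤ cs.length then c :: pvSpec (cs.drop (pvN cs k c)) else [c] := by
  unfold pvCand pvN
  cases h : (cs.drop k).idxOf? c with
  | none =>
    show [c] = if cs.length + 1 ≤ cs.length then c :: pvSpec (cs.drop (cs.length + 1)) else [c]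
    rw [if_neg (by omega)]
  | some j =>
    rcases List.idxOf?_eq_some_iff.mp h with ⟨hj, _, _⟩
    rw [List.length_drop] at hj
    show c :: pvSpec ((cs.drop k).drop (j + 1)) =
      if k + j + 1 ≤ cs.length then c :: pvSpec (cs.drop (k + j + 1)) else [c]
    rw [if_pos (by omega), List.drop_drop]
    have : k + (j + 1) = k + j + 1 := by omega
    rw [this]

-- ---- pvF facts ----
lemma pvSpec_nil : pvSpec ([] : List Char) = ['a'] := by decide

lemma pvF_big (cs : List Char) (k : Nat) (hk : cs.length < k) : pvF cs k = 0 := by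
  unfold pvF
  rw [if_neg (by omega)]

lemma pvF_last (cs : List Char) : pvF cs cs.length = 1 := by
  unfold pvF
  rw [if_pos (le_refl _), List.drop_length, pvSpec_nil]
  rfl

lemma pvF_pos (cs : List Char) (k : Nat) (hk : k ≤ cs.length) : 1 ≤ pvF cs k := by
  unfold pvF
  rw [if_pos hk]
  exact List.length_pos_of_ne_nil (pvSpec_ne_nil _)

lemma pvF_succ_le (cs : List Char) (k : Nat) : pvF cs (k + 1) ≤ pvF cs k := by
  unfold pvF
  by_cases hk : k < cs.length
  · rw [if_pos (by omega), if_pos (by omega)]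
    have := pvSpec_len_cons cs[k] (cs.drop (k + 1))
    rw [← List.drop_eq_getElem_cons hk] at this
    exact this
  · by_cases hk2 : k + 1 ≤ cs.length
    · omega
    · rw [if_neg hk2]
      omega

lemma pvF_antitone (cs : List Char) {k k' : Nat} (h : k ≤ k') : pvF cs k' ≤ pvF cs k := by
  induction k' with
  | zero =>
    have hk0 : k = 0 := Nat.le_zero.mp h
    rw [hk0]
  | succ m ih =>
    by_cases hm : k ≤ m
    · exact le_trans (pvF_succ_le cs m) (ih hm)
    · have : k = m + 1 := by omega
      rw [this]

lemma pvG_len (cs : List Char) (k : Nat) (hk : k ≤ cs.length) (c : Char) :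
    (pvCand (cs.drop k) c).length = 1 + pvG cs k c := by
  rw [pvCand_drop_eq]
  unfold pvG pvF
  by_cases h : pvN cs k c ≤ cs.length
  · rw [if_pos h, if_pos h]
    simp [Nat.add_comm]
  · rw [if_neg h, if_neg h]
    rfl

lemma pvF_eq_exists (cs : List Char) (k : Nat) (hk : k ≤ cs.length) :
    ∃ c ∈ pvAlpha, pvF cs k = 1 + pvG cs k c := by
  rcases (pvSpec_isMin (cs.drop k)).1 with ⟨c, hc, hv⟩
  refine ⟨c, hc, ?_⟩
  rw [← pvG_len cs k hk c, ← hv]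
  unfold pvF
  rw [if_pos hk]

lemma pvF_le_g (cs : List Char) (k : Nat) (hk : k ≤ cs.length) {c : Char} (hc : c ∈ pvAlpha) :
    pvF cs k ≤ 1 + pvG cs k c := by
  have := pvSpec_len_le (cs.drop k) hc
  rw [pvG_len cs k hk c] at this
  unfold pvF
  rw [if_pos hk]
  exact this

lemma pvAlpha_length : pvAlpha.length = 26 := by decide

lemma pvCj_mem (j : Nat) (hj : j < 26) : pvCj j ∈ pvAlpha := by
  interval_cases j <;> decide

lemma pvCj_getElem (j : Nat) (h : j < pvAlpha.length) : pvAlpha[j] = pvCj j := by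
  unfold pvCj
  rw [List.getD_eq_getElem?_getD, List.getElem?_eq_getElem h]
  rfl

lemma pvAlpha_strictMono : ∀ (i j : Fin 26), i < j → pvCj i < pvCj j := by decide

-- the reconstruction step: the first letter whose remainder length fits heads the answer
lemma pvStep (cs : List Char) (k : Nat) (hk : k ≤ cs.length) (j₀ : Nat) (hj : j₀ < 26)
    (h0 : 1 + pvG cs k (pvCj j₀) = pvF cs k)
    (hmin : ∀ j, j < j₀ → 1 + pvG cs k (pvCj j) ≠ pvF cs k) :
    pvSpec (cs.drop k) = pvCand (cs.drop k) (pvCj j₀) := by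
  refine pvIsMin_unique (pvSpec_isMin (cs.drop k)) ⟨⟨pvCj j₀, pvCj_mem j₀ hj, rfl⟩, ?_⟩
  intro c hc
  rcases List.mem_iff_getElem.mp hc with ⟨jc, hjc, hceq⟩
  rw [pvCj_getElem jc hjc] at hceq
  rw [pvAlpha_length] at hjc
  subst hceq
  have hlen0 : (pvCand (cs.drop k) (pvCj j₀)).length = pvF cs k := by
    rw [pvG_len cs k hk]
    exact h0
  have hlenc : (pvCand (cs.drop k) (pvCj jc)).length = 1 + pvG cs k (pvCj jc) :=
    pvG_len cs k hk _
  have hge : (pvCand (cs.drop k) (pvCj j₀)).length ≤ (pvCand (cs.drop k) (pvCj jc)).length := by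
    rw [hlen0, hlenc]
    exact pvF_le_g cs k hk (pvCj_mem jc hjc)
  by_cases heq : (pvCand (cs.drop k) (pvCj jc)).length = (pvCand (cs.drop k) (pvCj j₀)).length
  · -- equal length: jc cannot be before j₀, so letter j₀ is not larger
    have hgc : 1 + pvG cs k (pvCj jc) = pvF cs k := by rw [← hlenc, heq, hlen0]
    by_cases hjj : jc = j₀
    · subst hjj
      exact pvKeyLt_irrefl _
    · have hlt : j₀ < jc := by
        rcases Nat.lt_or_ge jc j₀ with h' | h'
        · exact absurd hgc (hmin jc h')
        · omega
      have hchar : pvCj j₀ < pvCj jc := pvAlpha_strictMono ⟨j₀, hj⟩ ⟨jc, hjc⟩ hlt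
      rcases pvCand_head (cs.drop k) (pvCj jc) with ⟨tc, htc⟩
      rcases pvCand_head (cs.drop k) (pvCj j₀) with ⟨t0, ht0⟩
      rw [htc, ht0]
      unfold pvKeyLt
      have : pvLexLt (pvCj jc :: tc) (pvCj j₀ :: t0) = false := by
        unfold pvLexLt
        rw [if_neg (ne_of_gt hchar)]
        simp [not_lt_of_gt hchar, le_of_lt hchar]
      rw [this]
      rw [htc, ht0] at heq
      simp [heq]
  · -- strictly longer: not smaller in the key order
    unfold pvKeyLt
    have h1 : ¬ (pvCand (cs.drop k) (pvCj jc)).length < (pvCand (cs.drop k) (pvCj j₀)).length := by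
      omega
    simp [h1, fun hh => heq hh]

-- ---- Nat-level accessors for the ports' lists ----
def pvMGet (m : List (List Int)) (i j : Nat) : Int := (m.getD i []).getD j 0

lemma pvGet2_natCast (m : List (List Int)) (i j : Nat) :
    pvGet2 m (i : Int) (j : Int) = pvMGet m i j := by
  simp [pvGet2, pvMGet, PySem.List.pyGet?_natCast, List.getD_eq_getElem?_getD]

lemma pvGet1_natCast (xs : List Int) (i : Nat) : pvGet1 xs (i : Int) = xs.getD i 0 := by
  simp [pvGet1, PySem.List.pyGet?_natCast, List.getD_eq_getElem?_getD]

lemma pvSet_natCast {α : Type} (xs : List α) (i : Nat) (v : α) : pvSet xs (i : Int) v = xs.set i v := by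
  simp [pvSet]

lemma pvSet2_natCast (m : List (List Int)) (i j : Nat) (v : Int) :
    pvSet2 m (i : Int) (j : Int) v = m.set i ((m.getD i []).set j v) := by
  simp [pvSet2, pvSet, PySem.List.pyGet?_natCast, List.getD_eq_getElem?_getD]

lemma getD_set {α : Type} (xs : List α) (i k : Nat) (v d : α) :
    (xs.set i v).getD k d = if i = k ∧ i < xs.length then v else xs.getD k d := by
  simp only [List.getD_eq_getElem?_getD, List.getElem?_set]
  by_cases h1 : i = k
  · subst h1
    by_cases h2 : i < xs.length
    · simp [h2]
    · simp [h2]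
  · simp [h1]

def pvShape (cs : List Char) (m : List (List Int)) : Prop :=
  m.length = cs.length + 1 ∧ ∀ r ∈ m, r.length = 26

lemma pvShape_set2 (cs : List Char) (m : List (List Int)) (i j : Nat) (v : Int)
    (hs : pvShape cs m) (hi : i < m.length) : pvShape cs (m.set i ((m.getD i []).set j v)) := by
  refine ⟨by rw [List.length_set]; exact hs.1, ?_⟩
  intro r hr
  rcases List.mem_or_eq_of_mem_set hr with h | h
  · exact hs.2 r h
  · subst h
    rw [List.length_set]
    have : m.getD i [] = m[i] := by
      rw [List.getD_eq_getElem?_getD, List.getElem?_eq_getElem hi]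
      rfl
    rw [this]
    exact hs.2 _ (List.getElem_mem hi)

lemma pvMGet_set2 (m : List (List Int)) (i j i' j' : Nat) (v : Int) :
    pvMGet (m.set i ((m.getD i []).set j v)) i' j' =
      if i = i' ∧ j = j' then (if i < m.length ∧ j < (m.getD i []).length then v else pvMGet m i' j')
      else pvMGet m i' j' := by
  unfold pvMGet
  rw [getD_set]
  by_cases h1 : i = i'
  · subst h1
    by_cases h2 : i < m.length
    · rw [if_pos ⟨rfl, h2⟩, getD_set]
      by_cases h3 : j = j'
      · subst h3
        by_cases h4 : j < (m.getD i []).length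
        · simp [h2]
        · simp [h2]
      · simp [h3]
    · rw [if_neg (by tauto)]
      by_cases h3 : j = j' <;> simp [h2, h3]
  · rw [if_neg (by tauto)]
    simp [h1]

-- ---- proof-side names for A's intermediate tables (definitionally the port's lets) ----
def pvAlpha2 : PySem.Dict Char Int :=
  (PySem.List.enumerate pvAlpha).foldl (fun d p => d.insert p.2 p.1) PySem.Dict.empty

def pvMemo (cs : List Char) : List (List Int) :=
  let l : Int := cs.length
  let memo : List (List Int) := (PySem.List.pyRange l (-1) (-1)).map (fun _ => List.replicate 26 (0 : Int))
  let memo := (PySem.List.pyRange 0 26 1).foldl (fun memo i => pvSet2 memo l i (l + 1)) memo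
  pvAlpha2.items.foldl (fun memo xy =>
    (PySem.List.pyRange (l - 1) (-1) (-1)).foldl (fun memo i =>
      if (PySem.List.pyGet? cs i).getD ' ' = xy.1 then
        pvSet2 memo i xy.2 (i + 1)
      else
        pvSet2 memo i xy.2 (pvGet2 memo (i + 1) xy.2)) memo) memo

def pvSearch (cs : List Char) : List Int :=
  let l : Int := cs.length
  let search : List Int := List.replicate (l + 2).toNat 1
  let search := pvSet search (l + 1) 0
  (PySem.List.pyRange (l - 1) (-1) (-1)).foldl (fun search i =>
    let m := (PySem.List.max? ((PySem.List.pyRange 0 26 1).map (fun j => pvGet2 (pvMemo cs) i j)) (fun x => x)).getD 0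
    if m ≠ l + 1 then pvSet search i (pvGet1 search m + 1) else search) search

lemma portA_eq (A : String) :
    find_shortest_non_subsequence A =
      String.ofList ((PySem.List.pyRange 0 (pvGet1 (pvSearch A.toList) 0) 1).foldl
        (fun st i => pvScan (pvMemo A.toList) (pvSearch A.toList) (pvGet1 (pvSearch A.toList) 0) i
          (PySem.List.pyRange 0 26 1) st) ((0 : Int), (0 : Int), ([] : List Char), (0 : Int))).2.2.1 := rfl

def pvBFold (cs : List Char) : PySem.Dict Char Int × List (List Char) :=
  let l : Int := cs.length
  (PySem.List.pyRange l (-1) (-1)).foldl (fun st pos =>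
    let nxt := if pos < l then st.1.insert ((PySem.List.pyGet? cs pos).getD ' ') pos else st.1
    let dp := st.2
    let best := pvAlpha.foldl (fun best c =>
      let cand : List Char :=
        match nxt.get? c with
        | some k => c :: (PySem.List.pyGet? dp (k + 1)).getD []
        | none => [c]
      if best == [] || pvKeyLt cand best then cand else best) []
    (nxt, pvSet dp pos best))
    ((PySem.Dict.empty : PySem.Dict Char Int), List.replicate ((cs.length : Int) + 1).toNat ([] : List Char))

lemma portB_eq (A : String) :
    find_shortest_non_subsequence_alt A =
      String.ofList ((PySem.List.pyGet? (pvBFold A.toList).2 0).getD []) := rfl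

-- ---- the memo table holds the next-occurrence indices ----
lemma pvMGet_zero_col (m : List (List Int)) (i j : Nat)
    (hall : ∀ r ∈ m, r = List.replicate 26 (0 : Int)) : pvMGet m i j = 0 := by
  unfold pvMGet
  by_cases hi : i < m.length
  · have : m.getD i [] = List.replicate 26 (0 : Int) := by
      rw [List.getD_eq_getElem?_getD, List.getElem?_eq_getElem hi]
      exact hall _ (List.getElem_mem hi)
    rw [this, List.getD_eq_getElem?_getD, List.getElem?_replicate]
    split <;> rfl
  · have h0 : m.getD i [] = [] := by
      rw [List.getD_eq_getElem?_getD, List.getElem?_eq_none (by omega : m.length ≤ i)]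
      rfl
    rw [h0]
    rfl

-- stage 1: the row-l fill loop
lemma pvMemo_stage1 (cs : List Char) (m₀ : List (List Int))
    (hshape : pvShape cs m₀) (hzero : ∀ i j, pvMGet m₀ i j = 0) :
    ∀ (t : Nat), t ≤ 26 →
      pvShape cs ((PySem.List.pyRange 0 (t : Int) 1).foldl
          (fun memo i => pvSet2 memo (cs.length : Int) i ((cs.length : Int) + 1)) m₀) ∧
      ∀ (i j : Nat), pvMGet ((PySem.List.pyRange 0 (t : Int) 1).foldl
          (fun memo i => pvSet2 memo (cs.length : Int) i ((cs.length : Int) + 1)) m₀) i j =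
        if i = cs.length ∧ j < t then (cs.length : Int) + 1 else 0 := by
  intro t
  induction t with
  | zero =>
    intro _
    rw [PySem.List.pyRange_one_eq_nil (by omega), List.foldl_nil]
    refine ⟨hshape, ?_⟩
    intro i j
    rw [hzero i j]
    simp
  | succ t ih =>
    intro ht
    have hprev := ih (by omega)
    have hc : (((t : Nat) + 1 : Nat) : Int) = ((t : Nat) : Int) + 1 := by push_cast; ring
    rw [hc, PySem.List.pyRange_one_succ_right (by omega : (0 : Int) ≤ (t : Int)), List.foldl_append]
    set mp := (PySem.List.pyRange 0 (t : Int) 1).foldl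
        (fun memo i => pvSet2 memo (cs.length : Int) i ((cs.length : Int) + 1)) m₀ with hmp
    rw [List.foldl_cons, List.foldl_nil, pvSet2_natCast]
    have hlen : cs.length < mp.length := by rw [hprev.1.1]; omega
    refine ⟨pvShape_set2 cs mp _ _ _ hprev.1 hlen, ?_⟩
    intro i j
    rw [pvMGet_set2 mp cs.length t i j _, hprev.2 i j]
    have hrow : (mp.getD cs.length []).length = 26 := by
      have : mp.getD cs.length [] = mp[cs.length] := by
        rw [List.getD_eq_getElem?_getD, List.getElem?_eq_getElem hlen]
        rfl
      rw [this]
      exact hprev.1.2 _ (List.getElem_mem hlen)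
    by_cases h1 : cs.length = i
    · by_cases h2 : t = j
      · subst h1; subst h2
        rw [if_pos ⟨rfl, rfl⟩, if_pos ⟨hlen, by rw [hrow]; omega⟩, if_pos ⟨rfl, by omega⟩]
      · simp only [if_neg (by tauto : ¬(cs.length = i ∧ t = j))]
        subst h1
        by_cases h3 : j < t
        · rw [if_pos ⟨rfl, h3⟩, if_pos ⟨rfl, by omega⟩]
        · rw [if_neg (by tauto), if_neg (by omega)]
    · rw [if_neg (by tauto), if_neg (by tauto), if_neg (by omega)]

-- the per-letter column update of A's memo loop
def pvColStep (cs : List Char) (x : Char) (y : Int) : List (List Int) → Int → List (List Int) :=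
  fun memo i =>
    if (PySem.List.pyGet? cs i).getD ' ' = x then pvSet2 memo i y (i + 1)
    else pvSet2 memo i y (pvGet2 memo (i + 1) y)

-- stage 2 inner: one column pass fills column y with next-occurrence values
lemma pvMemo_inner (cs : List Char) (x : Char) (y : Nat) (hy : y < 26) :
    ∀ (t : Nat), t ≤ cs.length → ∀ m, pvShape cs m →
      (∀ i, t ≤ i → i ≤ cs.length → pvMGet m i y = ((pvN cs i x : Nat) : Int)) →
      pvShape cs ((PySem.List.pyRange ((t : Int) - 1) (-1) (-1)).foldl (pvColStep cs x (y : Int)) m) ∧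
      (∀ i, i ≤ cs.length →
        pvMGet ((PySem.List.pyRange ((t : Int) - 1) (-1) (-1)).foldl (pvColStep cs x (y : Int)) m) i y =
          ((pvN cs i x : Nat) : Int)) ∧
      (∀ i j, j ≠ y →
        pvMGet ((PySem.List.pyRange ((t : Int) - 1) (-1) (-1)).foldl (pvColStep cs x (y : Int)) m) i j =
          pvMGet m i j) := by
  intro t
  induction t with
  | zero =>
    intro _ m hs hcol
    rw [PySem.List.pyRange_neg_one_eq_nil (by omega)]
    exact ⟨hs, fun i hi => hcol i (by omega) hi, fun i j _ => rfl⟩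
  | succ t ih =>
    intro ht m hs hcol
    have hc : (((t : Nat) + 1 : Nat) : Int) - 1 = (t : Int) := by push_cast; ring
    rw [hc, PySem.List.pyRange_neg_one_cons (by omega : (-1 : Int) < (t : Int)), List.foldl_cons]
    have htl : t < cs.length := by omega
    have hget : (PySem.List.pyGet? cs (t : Int)).getD ' ' = cs[t] := by
      rw [PySem.List.pyGet?_natCast, List.getElem?_eq_getElem htl]
      rfl
    have hwrite : pvColStep cs x (y : Int) m (t : Int) =
        m.set t ((m.getD t []).set y ((pvN cs t x : Nat) : Int)) := by
      unfold pvColStep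
      rw [hget]
      by_cases hx : cs[t] = x
      · rw [if_pos hx, pvSet2_natCast]
        rw [pvN_step_eq cs t x htl hx]
        push_cast
        ring_nf
      · rw [if_neg hx]
        have hcast : ((t : Int) + 1) = (((t + 1 : Nat) : Int)) := by push_cast; ring
        rw [hcast, pvGet2_natCast, pvSet2_natCast]
        rw [hcol (t + 1) (by omega) (by omega), pvN_step_ne cs t x htl hx]
    rw [hwrite]
    have hlen : t < m.length := by rw [hs.1]; omega
    have hrow : (m.getD t []).length = 26 := by
      have : m.getD t [] = m[t] := by
        rw [List.getD_eq_getElem?_getD, List.getElem?_eq_getElem hlen]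
        rfl
      rw [this]
      exact hs.2 _ (List.getElem_mem hlen)
    have hs' := pvShape_set2 cs m t y ((pvN cs t x : Nat) : Int) hs hlen
    have hcol' : ∀ i, t ≤ i → i ≤ cs.length →
        pvMGet (m.set t ((m.getD t []).set y ((pvN cs t x : Nat) : Int))) i y =
          ((pvN cs i x : Nat) : Int) := by
      intro i hi1 hi2
      rw [pvMGet_set2]
      by_cases hit : t = i
      · subst hit
        rw [if_pos ⟨rfl, rfl⟩, if_pos ⟨hlen, by rw [hrow]; exact hy⟩]
      · rw [if_neg (by tauto)]
        exact hcol i (by omega) hi2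
    have := ih (by omega) _ hs' hcol'
    refine ⟨this.1, this.2.1, ?_⟩
    intro i j hj
    rw [this.2.2 i j hj, pvMGet_set2]
    rw [if_neg (by tauto)]

-- stage 2: the letter loop fills all 26 columns
lemma pvMemo_stage2 (cs : List Char) :
    ∀ (R : List (Char × Int)) (t : Nat), t + R.length = 26 →
      (∀ (r : Nat) (hr : r < R.length), R[r] = (pvCj (t + r), ((t + r : Nat) : Int))) →
      ∀ m, pvShape cs m →
      (∀ i j, i ≤ cs.length → j < 26 →
        pvMGet m i j = if j < t then ((pvN cs i (pvCj j) : Nat) : Int)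
          else (if i = cs.length then ((cs.length : Int) + 1) else 0)) →
      pvShape cs (R.foldl (fun memo xy =>
        (PySem.List.pyRange ((cs.length : Int) - 1) (-1) (-1)).foldl (pvColStep cs xy.1 xy.2) memo) m) ∧
      ∀ i j, i ≤ cs.length → j < 26 →
        pvMGet (R.foldl (fun memo xy =>
          (PySem.List.pyRange ((cs.length : Int) - 1) (-1) (-1)).foldl (pvColStep cs xy.1 xy.2) memo) m) i j =
          ((pvN cs i (pvCj j) : Nat) : Int) := by
  intro R
  induction R with
  | nil =>
    intro t ht _ m hs hinv
    rw [List.foldl_nil]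
    refine ⟨hs, ?_⟩
    intro i j hi hj
    rw [hinv i j hi hj, if_pos (by simp at ht; omega)]
  | cons p R' ih =>
    intro t ht helem m hs hinv
    have hlenR : R'.length + 1 = (p :: R').length := by simp
    have hp : p = (pvCj t, ((t : Nat) : Int)) := by
      have := helem 0 (by simp)
      simpa using this
    rw [List.foldl_cons]
    have hcast : ((cs.length : Int)) - 1 = ((cs.length : Nat) : Int) - 1 := by norm_num
    -- the inner pass on column t
    have hcol0 : ∀ i, cs.length ≤ i → i ≤ cs.length →
        pvMGet m i t = ((pvN cs i (pvCj t) : Nat) : Int) := by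
      intro i hi1 hi2
      have hieq : i = cs.length := by omega
      rw [hinv i t hi2 (by simp at ht; omega), if_neg (by omega), if_pos hieq,
        pvN_of_ge cs i (pvCj t) (by omega)]
      push_cast
      omega
    have hinner := pvMemo_inner cs (pvCj t) t (by simp at ht; omega) cs.length (le_refl _) m hs hcol0
    have hbody : (PySem.List.pyRange ((cs.length : Int) - 1) (-1) (-1)).foldl (pvColStep cs p.1 p.2) m =
        (PySem.List.pyRange (((cs.length : Nat) : Int) - 1) (-1) (-1)).foldl
          (pvColStep cs (pvCj t) ((t : Nat) : Int)) m := by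
      rw [hp]
    rw [hbody]
    set m1 := (PySem.List.pyRange (((cs.length : Nat) : Int) - 1) (-1) (-1)).foldl
        (pvColStep cs (pvCj t) ((t : Nat) : Int)) m with hm1
    have hinv1 : ∀ i j, i ≤ cs.length → j < 26 →
        pvMGet m1 i j = if j < t + 1 then ((pvN cs i (pvCj j) : Nat) : Int)
          else (if i = cs.length then ((cs.length : Int) + 1) else 0) := by
      intro i j hi hj
      by_cases hjt : j = t
      · subst hjt
        rw [hinner.2.1 i hi, if_pos (by omega : j < j + 1)]
      · rw [hinner.2.2 i j hjt, hinv i j hi hj]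
        by_cases h1 : j < t
        · rw [if_pos h1, if_pos (by omega : j < t + 1)]
        · rw [if_neg h1, if_neg (by omega : ¬ j < t + 1)]
    have helem' : ∀ (r : Nat) (hr : r < R'.length), R'[r] = (pvCj (t + 1 + r), ((t + 1 + r : Nat) : Int)) := by
      intro r hr
      have := helem (r + 1) (by simp; omega)
      have hidx : (p :: R')[r + 1] = R'[r] := rfl
      rw [hidx] at this
      rw [this]
      have : t + (r + 1) = t + 1 + r := by omega
      rw [this]
    exact ih (t + 1) (by simp at ht ⊢; omega) helem' m1 hinner.1 hinv1

lemma pvAlpha2_items_len : pvAlpha2.items.length = 26 := by decide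

lemma pvAlpha2_items_elem : ∀ (r : Nat) (hr : r < pvAlpha2.items.length),
    pvAlpha2.items[r] = (pvCj r, ((r : Nat) : Int)) := by
  decide

lemma pvMemo_spec (cs : List Char) :
    pvShape cs (pvMemo cs) ∧
    ∀ (i j : Nat), i ≤ cs.length → j < 26 →
      pvMGet (pvMemo cs) i j = ((pvN cs i (pvCj j) : Nat) : Int) := by
  have hm0shape : pvShape cs ((PySem.List.pyRange (cs.length : Int) (-1) (-1)).map
      (fun _ => List.replicate 26 (0 : Int))) := by
    constructor
    · rw [List.length_map, PySem.List.length_pyRange_neg_one]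
      omega
    · intro r hr
      rcases List.mem_map.mp hr with ⟨_, _, rfl⟩
      simp
  have hm0zero : ∀ i j, pvMGet ((PySem.List.pyRange (cs.length : Int) (-1) (-1)).map
      (fun _ => List.replicate 26 (0 : Int))) i j = 0 := by
    intro i j
    apply pvMGet_zero_col
    intro r hr
    rcases List.mem_map.mp hr with ⟨_, _, rfl⟩
    rfl
  have h1 := pvMemo_stage1 cs _ hm0shape hm0zero 26 (le_refl _)
  have hc26 : (((26 : Nat) : Int)) = (26 : Int) := by norm_num
  rw [hc26] at h1
  have hinv0 : ∀ i j, i ≤ cs.length → j < 26 →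
      pvMGet ((PySem.List.pyRange 0 (26 : Int) 1).foldl
        (fun memo i => pvSet2 memo (cs.length : Int) i ((cs.length : Int) + 1))
        ((PySem.List.pyRange (cs.length : Int) (-1) (-1)).map (fun _ => List.replicate 26 (0 : Int)))) i j =
        if j < 0 then ((pvN cs i (pvCj j) : Nat) : Int)
          else (if i = cs.length then ((cs.length : Int) + 1) else 0) := by
    intro i j hi hj
    rw [h1.2 i j]
    by_cases hil : i = cs.length
    · rw [if_pos ⟨hil, hj⟩, if_neg (by omega : ¬ j < 0), if_pos hil]
    · rw [if_neg (by tauto : ¬ (i = cs.length ∧ j < 26)), if_neg (by omega : ¬ j < 0), if_neg hil]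
  have h2 := pvMemo_stage2 cs pvAlpha2.items 0 (by rw [pvAlpha2_items_len])
    (fun r hr => by simpa using pvAlpha2_items_elem r hr) _ h1.1 hinv0
  exact h2

-- ---- the search table holds the answer lengths ----
def pvSearchStep (cs : List Char) : List Int → Int → List Int :=
  fun search i =>
    let m := (PySem.List.max? ((PySem.List.pyRange 0 26 1).map
        (fun j => pvGet2 (pvMemo cs) i j)) (fun x => x)).getD 0
    if m ≠ (cs.length : Int) + 1 then pvSet search i (pvGet1 search m + 1) else search

-- the max of row t of the memo table
lemma pvMaxRow (cs : List Char) (t : Nat) (ht : t ≤ cs.length) :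
    ∃ jm : Nat, jm < 26 ∧
      (PySem.List.max? ((PySem.List.pyRange 0 26 1).map
        (fun j => pvGet2 (pvMemo cs) (t : Int) j)) (fun x => x)).getD 0 = ((pvN cs t (pvCj jm) : Nat) : Int) ∧
      ∀ j : Nat, j < 26 → pvN cs t (pvCj j) ≤ pvN cs t (pvCj jm) := by
  have hmemo := (pvMemo_spec cs).2
  have hmap : ∀ (j : Int), j ∈ PySem.List.pyRange 0 26 1 →
      pvGet2 (pvMemo cs) (t : Int) j = ((pvN cs t (pvCj j.toNat) : Nat) : Int) := by
    intro j hj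
    rw [PySem.List.mem_pyRange_one] at hj
    have hjn : j = ((j.toNat : Nat) : Int) := by omega
    rw [hjn, pvGet2_natCast]
    exact hmemo t j.toNat ht (by omega)
  rcases hmx : PySem.List.max? ((PySem.List.pyRange 0 26 1).map
      (fun j => pvGet2 (pvMemo cs) (t : Int) j)) (fun x => x) with _ | mv
  · exfalso
    have hnil := (PySem.List.max?_eq_none_iff _ _).mp hmx
    rw [List.map_eq_nil_iff] at hnil
    have : ((0 : Nat) : Int) ∈ PySem.List.pyRange 0 26 1 := by
      rw [PySem.List.mem_pyRange_one]
      omega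
    rw [hnil] at this
    exact (List.not_mem_nil) this
  · have hmem := PySem.List.max?_mem hmx
    rcases List.mem_map.mp hmem with ⟨j, hjmem, hjval⟩
    have hjr := PySem.List.mem_pyRange_one.mp hjmem
    refine ⟨j.toNat, by omega, ?_, ?_⟩
    · exact hjval.symm.trans (hmap j hjmem)
    · intro j' hj'
      have hj'mem : ((j' : Nat) : Int) ∈ PySem.List.pyRange 0 26 1 := by
        rw [PySem.List.mem_pyRange_one]
        omega
      have hle := PySem.List.max?_isMax hmx _ (List.mem_map.mpr ⟨((j' : Nat) : Int), hj'mem, rfl⟩)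
      rw [hmap _ hj'mem] at hle
      rw [← hjval, hmap j hjmem] at hle
      simp only [Int.toNat_natCast] at hle
      exact_mod_cast hle

-- downward pass filling the search table
lemma pvSearch_inner (cs : List Char) :
    ∀ (t : Nat), t ≤ cs.length → ∀ s : List Int, s.length = cs.length + 2 →
      (∀ k, t ≤ k → k ≤ cs.length + 1 → s.getD k 0 = ((pvF cs k : Nat) : Int)) →
      (∀ k, k < t → s.getD k 0 = 1) →
      ((PySem.List.pyRange ((t : Int) - 1) (-1) (-1)).foldl (pvSearchStep cs) s).length = cs.length + 2 ∧
      ∀ k, k ≤ cs.length + 1 →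
        ((PySem.List.pyRange ((t : Int) - 1) (-1) (-1)).foldl (pvSearchStep cs) s).getD k 0 =
          ((pvF cs k : Nat) : Int) := by
  intro t
  induction t with
  | zero =>
    intro _ s hlen hup _
    rw [PySem.List.pyRange_neg_one_eq_nil (by omega), List.foldl_nil]
    exact ⟨hlen, fun k hk => hup k (by omega) hk⟩
  | succ t ih =>
    intro ht s hlen hup hlow
    have hc : (((t : Nat) + 1 : Nat) : Int) - 1 = (t : Int) := by push_cast; ring
    rw [hc, PySem.List.pyRange_neg_one_cons (by omega : (-1 : Int) < (t : Int)), List.foldl_cons]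
    rcases pvMaxRow cs t (by omega) with ⟨jm, hjm, hmv, hmax⟩
    have hstep : pvSearchStep cs s (t : Int) =
        (if ((pvN cs t (pvCj jm) : Nat) : Int) ≠ (cs.length : Int) + 1
         then pvSet s (t : Int) (pvGet1 s ((pvN cs t (pvCj jm) : Nat) : Int) + 1) else s) := by
      unfold pvSearchStep
      rw [hmv]
    rw [hstep]
    by_cases hall : pvN cs t (pvCj jm) = cs.length + 1
    · -- some letter is absent from cs[t:]: the row keeps its initial 1 and pvF t = 1
      rw [if_neg (by rw [hall]; push_cast; omega)]
      have hf1 : pvF cs t = 1 := by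
        have hle := pvF_le_g cs t (by omega) (pvCj_mem jm hjm)
        have hpos := pvF_pos cs t (by omega)
        unfold pvG at hle
        rw [hall, pvF_big cs (cs.length + 1) (by omega)] at hle
        omega
      apply ih (by omega) s hlen
      · intro k hk1 hk2
        by_cases hkt : k = t
        · subst hkt
          rw [hlow _ (by omega), hf1]
          norm_num
        · exact hup k (by omega) hk2
      · intro k hk
        exact hlow k (by omega)
    · -- every letter occurs after t: the maximum is in range and the recurrence fires
      have hnle : pvN cs t (pvCj jm) ≤ cs.length := by
        have := pvN_le cs t (pvCj jm)
        omega
      rw [if_pos (by omega : ((pvN cs t (pvCj jm) : Nat) : Int) ≠ (cs.length : Int) + 1)]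
      rw [pvGet1_natCast s (pvN cs t (pvCj jm))]
      have hread : s.getD (pvN cs t (pvCj jm)) 0 = ((pvF cs (pvN cs t (pvCj jm)) : Nat) : Int) := by
        apply hup
        · have := pvN_ge' cs t (pvCj jm) (by omega)
          omega
        · omega
      rw [hread]
      have hrec : pvF cs t = pvF cs (pvN cs t (pvCj jm)) + 1 := by
        rcases pvF_eq_exists cs t (by omega) with ⟨c0, hc0, heq0⟩
        rcases List.mem_iff_getElem.mp hc0 with ⟨j0, hj0, hj0eq⟩
        rw [pvCj_getElem j0 hj0] at hj0eq
        rw [pvAlpha_length] at hj0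
        have hle := pvF_le_g cs t (by omega) (pvCj_mem jm hjm)
        have hanti : pvF cs (pvN cs t c0) ≥ pvF cs (pvN cs t (pvCj jm)) := by
          rw [← hj0eq]
          exact pvF_antitone cs (hmax j0 hj0)
        unfold pvG at heq0 hle
        omega
      rw [pvSet_natCast]
      apply ih (by omega)
      · rw [List.length_set]
        exact hlen
      · intro k hk1 hk2
        rw [getD_set]
        by_cases hkt : t = k
        · rw [if_pos ⟨hkt, by omega⟩]
          subst hkt
          rw [hrec]
          push_cast
          ring
        · rw [if_neg (by omega : ¬ (t = k ∧ t < s.length))]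
          exact hup k (by omega) hk2
      · intro k hk
        rw [getD_set, if_neg (by omega : ¬ (t = k ∧ t < s.length))]
        exact hlow k (by omega)

lemma pvSearch_spec (cs : List Char) :
    (pvSearch cs).length = cs.length + 2 ∧
    ∀ (k : Nat), k ≤ cs.length + 1 → (pvSearch cs).getD k 0 = ((pvF cs k : Nat) : Int) := by
  have hbase : (List.replicate ((cs.length : Int) + 2).toNat (1 : Int)).length = cs.length + 2 := by
    rw [List.length_replicate]
    omega
  have hsetcast : pvSet (List.replicate ((cs.length : Int) + 2).toNat (1 : Int)) ((cs.length : Int) + 1) (0 : Int) =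
      (List.replicate ((cs.length : Int) + 2).toNat (1 : Int)).set (cs.length + 1) 0 := by
    have h : ((cs.length : Int) + 1) = (((cs.length + 1 : Nat) : Nat) : Int) := by push_cast; ring
    rw [h, pvSet_natCast]
  have hup : ∀ k, cs.length ≤ k → k ≤ cs.length + 1 →
      ((List.replicate ((cs.length : Int) + 2).toNat (1 : Int)).set (cs.length + 1) 0).getD k 0 =
        ((pvF cs k : Nat) : Int) := by
    intro k hk1 hk2
    rw [getD_set]
    by_cases hk : k = cs.length + 1
    · rw [if_pos ⟨hk.symm, by rw [hbase]; omega⟩]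
      subst hk
      unfold pvF
      rw [if_neg (by omega)]
      rfl
    · rw [if_neg (by omega)]
      have hkl : k = cs.length := by omega
      subst hkl
      rw [List.getD_eq_getElem?_getD, List.getElem?_replicate, if_pos (by omega)]
      rw [pvF_last]
      rfl
  have hlow : ∀ k, k < cs.length →
      ((List.replicate ((cs.length : Int) + 2).toNat (1 : Int)).set (cs.length + 1) 0).getD k 0 = 1 := by
    intro k hk
    rw [getD_set, if_neg (by omega : ¬ (cs.length + 1 = k ∧ cs.length + 1 < (List.replicate ((cs.length : Int) + 2).toNat (1 : Int)).length))]
    rw [List.getD_eq_getElem?_getD, List.getElem?_replicate, if_pos (by omega)]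
    rfl
  have h := pvSearch_inner cs cs.length (le_refl _) _
    (by rw [List.length_set]; exact hbase) hup hlow
  show (((PySem.List.pyRange ((cs.length : Int) - 1) (-1) (-1)).foldl (pvSearchStep cs)
      (pvSet (List.replicate ((cs.length : Int) + 2).toNat (1 : Int)) ((cs.length : Int) + 1) 0)).length = cs.length + 2) ∧ _
  rw [hsetcast]
  exact h

-- ---- the reconstruction loop returns pvSpec ----
lemma pvScan_found (memo : List (List Int)) (search : List Int) (ansLen i : Int) :
    ∀ (J₁ : List Int) (j₀ : Int) (J₂ : List Int) (n0 seq0 : Int) (ans : List Char) (temp : Int),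
      (∀ j ∈ J₁, pvGet1 search (pvGet2 memo temp j) + i + 1 ≠ ansLen) →
      (pvGet1 search (pvGet2 memo temp j₀) + i + 1 = ansLen) →
      ∃ n' seq', pvScan memo search ansLen i (J₁ ++ j₀ :: J₂) (n0, seq0, ans, temp) =
        (n', seq', ans ++ [(PySem.List.pyGet? pvAlpha j₀).getD ' '], pvGet2 memo temp j₀) := by
  intro J₁
  induction J₁ with
  | nil =>
    intro j₀ J₂ n0 seq0 ans temp _ hcond
    rw [List.nil_append]
    simp only [pvScan]
    rw [if_pos hcond]
    exact ⟨_, _, rfl⟩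
  | cons j J₁ ih =>
    intro j₀ J₂ n0 seq0 ans temp hfail hcond
    rw [List.cons_append]
    simp only [pvScan]
    rw [if_neg (hfail j (by simp))]
    exact ih j₀ J₂ _ _ ans temp (fun j' hj' => hfail j' (by simp [hj'])) hcond

lemma pvRecon_loop (cs : List Char) :
    ∀ (rem : Nat), 1 ≤ rem → ∀ (tp : Nat) (ans : List Char) (n0 seq0 a tI : Int),
      tp ≤ cs.length → pvF cs tp = rem → a = ((pvF cs 0 : Nat) : Int) - ((rem : Nat) : Int) →
      tI = ((tp : Nat) : Int) →
      ((PySem.List.pyRange a ((pvF cs 0 : Nat) : Int) 1).foldl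
          (fun st i => pvScan (pvMemo cs) (pvSearch cs) ((pvF cs 0 : Nat) : Int) i
            (PySem.List.pyRange 0 26 1) st) (n0, seq0, ans, tI)).2.2.1 =
        ans ++ pvSpec (cs.drop tp) := by
  intro rem
  induction rem with
  | zero => omega
  | succ rem ih =>
    intro _ tp ans n0 seq0 a tI htp hF ha htI
    subst htI
    have hmemo := (pvMemo_spec cs).2
    have hsearch := (pvSearch_spec cs).2
    -- the letter the inner scan stops at
    have hPex : ∃ j : Nat, j < 26 ∧ 1 + pvG cs tp (pvCj j) = pvF cs tp := by
      rcases pvF_eq_exists cs tp htp with ⟨c, hc, hceq⟩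
      rcases List.mem_iff_getElem.mp hc with ⟨j, hj, hjeq⟩
      rw [pvCj_getElem j hj] at hjeq
      rw [pvAlpha_length] at hj
      exact ⟨j, hj, by rw [hjeq]; omega⟩
    set P : Nat → Prop := fun j => j < 26 ∧ 1 + pvG cs tp (pvCj j) = pvF cs tp with hP
    have hPdec : DecidablePred P := fun j => by rw [hP]; infer_instance
    let j₀ := @Nat.find P hPdec hPex
    have hj₀spec : P j₀ := @Nat.find_spec P hPdec hPex
    have hj₀min : ∀ m, m < j₀ → ¬ P m := fun m hm => @Nat.find_min P hPdec hPex m hm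
    have hj₀26 : j₀ < 26 := hj₀spec.1
    -- the Int-level scan condition matches P
    have hcond : ∀ (jn : Nat), jn < 26 →
        (pvGet1 (pvSearch cs) (pvGet2 (pvMemo cs) ((tp : Nat) : Int) ((jn : Nat) : Int)) + a + 1 =
          ((pvF cs 0 : Nat) : Int)
        ↔ 1 + pvG cs tp (pvCj jn) = pvF cs tp) := by
      intro jn hjn
      rw [pvGet2_natCast, hmemo tp jn htp hjn]
      rw [pvGet1_natCast, hsearch (pvN cs tp (pvCj jn)) (pvN_le cs tp (pvCj jn))]
      unfold pvG
      constructor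
      · intro h
        omega
      · intro h
        omega
    -- peel the iteration at i = a
    have hcons : PySem.List.pyRange a ((pvF cs 0 : Nat) : Int) 1 =
        a :: PySem.List.pyRange (a + 1) ((pvF cs 0 : Nat) : Int) 1 := by
      apply PySem.List.pyRange_one_cons
      omega
    rw [hcons, List.foldl_cons]
    -- split the 26-letter scan at j₀
    have hsplit : PySem.List.pyRange 0 26 1 =
        PySem.List.pyRange 0 ((j₀ : Nat) : Int) 1 ++ ((j₀ : Nat) : Int) :: PySem.List.pyRange (((j₀ : Nat) : Int) + 1) 26 1 := by
      rw [PySem.List.pyRange_one_append 0 ((j₀ : Nat) : Int) 26 (by omega) (by omega)]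
      rw [PySem.List.pyRange_one_cons (by omega : ((j₀ : Nat) : Int) < 26)]
    rcases pvScan_found (pvMemo cs) (pvSearch cs) ((pvF cs 0 : Nat) : Int) a
        (PySem.List.pyRange 0 ((j₀ : Nat) : Int) 1) ((j₀ : Nat) : Int)
        (PySem.List.pyRange (((j₀ : Nat) : Int) + 1) 26 1) n0 seq0 ans ((tp : Nat) : Int)
        (by
          intro j hj
          rw [PySem.List.mem_pyRange_one] at hj
          intro hcon
          have hjn : j = ((j.toNat : Nat) : Int) := by omega
          rw [hjn, hcond j.toNat (by omega)] at hcon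
          have := hj₀min j.toNat (by omega)
          rw [hP] at this
          exact this ⟨by omega, hcon⟩)
        (by
          rw [hcond j₀ hj₀26]
          exact hj₀spec.2) with ⟨n', seq', hscan⟩
    have hscan' : pvScan (pvMemo cs) (pvSearch cs) ((pvF cs 0 : Nat) : Int) a
        (PySem.List.pyRange 0 26 1) (n0, seq0, ans, ((tp : Nat) : Int)) =
        (n', seq', ans ++ [(PySem.List.pyGet? pvAlpha ((j₀ : Nat) : Int)).getD ' '],
          pvGet2 (pvMemo cs) ((tp : Nat) : Int) ((j₀ : Nat) : Int)) := by
      rw [hsplit]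
      exact hscan
    rw [hscan']
    -- the scanned letter heads the answer for suffix tp
    have hchar : (PySem.List.pyGet? pvAlpha ((j₀ : Nat) : Int)).getD ' ' = pvCj j₀ := by
      rw [PySem.List.pyGet?_natCast, List.getElem?_eq_getElem (by rw [pvAlpha_length]; omega)]
      show pvAlpha[j₀] = _
      exact pvCj_getElem j₀ (by rw [pvAlpha_length]; omega)
    have htemp' : pvGet2 (pvMemo cs) ((tp : Nat) : Int) ((j₀ : Nat) : Int) =
        ((pvN cs tp (pvCj j₀) : Nat) : Int) := by
      rw [pvGet2_natCast]
      exact hmemo tp j₀ htp hj₀26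
    rw [hchar, htemp']
    have hspec : pvSpec (cs.drop tp) = pvCand (cs.drop tp) (pvCj j₀) := by
      apply pvStep cs tp htp j₀ hj₀26 hj₀spec.2
      intro j hj
      have := hj₀min j hj
      rw [hP] at this
      intro hcon
      exact this ⟨by omega, hcon⟩
    rw [pvCand_drop_eq] at hspec
    by_cases hN : pvN cs tp (pvCj j₀) ≤ cs.length
    · -- the recursion continues at the next occurrence
      rw [if_pos hN] at hspec
      have hG : pvG cs tp (pvCj j₀) = rem := by
        have := hj₀spec.2
        omega
      have hFn : pvF cs (pvN cs tp (pvCj j₀)) = rem := by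
        unfold pvG at hG
        omega
      have hrem1 : 1 ≤ rem := by
        have := pvF_pos cs (pvN cs tp (pvCj j₀)) hN
        omega
      have := ih hrem1 (pvN cs tp (pvCj j₀)) (ans ++ [pvCj j₀]) n' seq' (a + 1)
        ((pvN cs tp (pvCj j₀) : Nat) : Int) hN hFn (by omega) rfl
      rw [this, hspec]
      simp
    · -- the chosen letter is absent: last iteration
      rw [if_neg hN] at hspec
      have hG : pvG cs tp (pvCj j₀) = 0 := by
        unfold pvG pvF
        rw [if_neg (by omega)]
      have hrem0 : rem = 0 := by
        have := hj₀spec.2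
        omega
      have hnil : PySem.List.pyRange (a + 1) ((pvF cs 0 : Nat) : Int) 1 = [] := by
        apply PySem.List.pyRange_one_eq_nil
        omega
      rw [hnil, List.foldl_nil]
      show ans ++ [pvCj j₀] = ans ++ pvSpec (cs.drop tp)
      rw [hspec]

set_option maxHeartbeats 2000000 in
lemma pvRecon (cs : List Char) :
    ((PySem.List.pyRange 0 (pvGet1 (pvSearch cs) 0) 1).foldl
        (fun st i => pvScan (pvMemo cs) (pvSearch cs) (pvGet1 (pvSearch cs) 0) i
          (PySem.List.pyRange 0 26 1) st) ((0 : Int), (0 : Int), ([] : List Char), (0 : Int))).2.2.1 =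
      pvSpec cs := by
  have hA : pvGet1 (pvSearch cs) 0 = ((pvF cs 0 : Nat) : Int) := by
    show pvGet1 (pvSearch cs) ((0 : Nat) : Int) = _
    rw [pvGet1_natCast]
    exact (pvSearch_spec cs).2 0 (by omega)
  rw [hA]
  have hpos : 1 ≤ pvF cs 0 := pvF_pos cs 0 (by omega)
  have h := pvRecon_loop cs (pvF cs 0) hpos 0 [] 0 0 0 0 (by omega) rfl (by ring) rfl
  rw [List.drop_zero, List.nil_append] at h
  exact h

-- ---- B's fold returns pvSpec ----
def pvBStep (cs : List Char) :
    (PySem.Dict Char Int × List (List Char)) → Int → (PySem.Dict Char Int × List (List Char)) :=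
  fun st pos =>
    let nxt := if pos < (cs.length : Int) then st.1.insert ((PySem.List.pyGet? cs pos).getD ' ') pos else st.1
    let dp := st.2
    let best := pvAlpha.foldl (fun best c =>
      let cand : List Char :=
        match nxt.get? c with
        | some k => c :: (PySem.List.pyGet? dp (k + 1)).getD []
        | none => [c]
      if best == [] || pvKeyLt cand best then cand else best) []
    (nxt, pvSet dp pos best)

lemma pvB_inner (cs : List Char) :
    ∀ (t : Nat), t ≤ cs.length + 1 → ∀ st : PySem.Dict Char Int × List (List Char),
      st.2.length = cs.length + 1 →
      (∀ c : Char, st.1.get? c = ((cs.drop t).idxOf? c).map (fun j => ((t + j : Nat) : Int))) →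
      (∀ k, t ≤ k → k ≤ cs.length → st.2.getD k [] = pvSpec (cs.drop k)) →
      ∀ k, k ≤ cs.length →
        ((PySem.List.pyRange ((t : Int) - 1) (-1) (-1)).foldl (pvBStep cs) st).2.getD k [] =
          pvSpec (cs.drop k) := by
  intro t
  induction t with
  | zero =>
    intro _ st _ _ hdp k hk
    rw [PySem.List.pyRange_neg_one_eq_nil (by omega), List.foldl_nil]
    exact hdp k (by omega) hk
  | succ t ih =>
    intro ht st hlen hnxt hdp k hk
    have hc : (((t : Nat) + 1 : Nat) : Int) - 1 = (t : Int) := by push_cast; ring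
    rw [hc, PySem.List.pyRange_neg_one_cons (by omega : (-1 : Int) < (t : Int)), List.foldl_cons]
    -- the updated next-occurrence map is correct for suffix t
    have hnxt' : ∀ c : Char,
        (if (t : Int) < (cs.length : Int) then st.1.insert ((PySem.List.pyGet? cs (t : Int)).getD ' ') (t : Int) else st.1).get? c =
          ((cs.drop t).idxOf? c).map (fun j => ((t + j : Nat) : Int)) := by
      intro c
      by_cases htl : t < cs.length
      · rw [if_pos (by omega : (t : Int) < (cs.length : Int))]
        have hget : (PySem.List.pyGet? cs (t : Int)).getD ' ' = cs[t] := by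
          rw [PySem.List.pyGet?_natCast, List.getElem?_eq_getElem htl]
          rfl
        rw [hget, PySem.Dict.get?_insert]
        have hdropt : cs.drop t = cs[t] :: cs.drop (t + 1) := List.drop_eq_getElem_cons htl
        by_cases hcc : c = cs[t]
        · rw [if_pos hcc, hdropt, ← hcc, List.idxOf?_cons, if_pos (beq_iff_eq.mpr rfl)]
          simp
        · rw [if_neg hcc, hnxt c, hdropt, List.idxOf?_cons, if_neg (by simp [Ne.symm hcc])]
          cases h2 : (cs.drop (t + 1)).idxOf? c with
          | none => simp
          | some j =>
            simp only [Option.map_some]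
            have : t + 1 + j = t + (j + 1) := by omega
            rw [this]
      · rw [if_neg (by omega : ¬ (t : Int) < (cs.length : Int)), hnxt c]
        have h1 : cs.drop t = [] := List.drop_eq_nil_of_le (by omega)
        have h2 : cs.drop (t + 1) = [] := List.drop_eq_nil_of_le (by omega)
        rw [h1, h2]
        rfl
    -- the freshly computed best string is the spec value of suffix t
    have hbest :
        (pvAlpha.foldl (fun best c =>
          let cand : List Char :=
            match (if (t : Int) < (cs.length : Int) then st.1.insert ((PySem.List.pyGet? cs (t : Int)).getD ' ') (t : Int) else st.1).get? c with
            | some k => c :: (PySem.List.pyGet? st.2 (k + 1)).getD []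
            | none => [c]
          if best == [] || pvKeyLt cand best then cand else best) []) = pvSpec (cs.drop t) := by
      have hfun : ∀ (b : List Char) (c : Char), c ∈ pvAlpha →
          (let cand : List Char :=
            match (if (t : Int) < (cs.length : Int) then st.1.insert ((PySem.List.pyGet? cs (t : Int)).getD ' ') (t : Int) else st.1).get? c with
            | some k => c :: (PySem.List.pyGet? st.2 (k + 1)).getD []
            | none => [c]
          if b == [] || pvKeyLt cand b then cand else b) =
          (if b == [] || pvKeyLt (pvCand (cs.drop t) c) b then pvCand (cs.drop t) c else b) := by
        intro b c _
        have hcand : (match (if (t : Int) < (cs.length : Int) then st.1.insert ((PySem.List.pyGet? cs (t : Int)).getD ' ') (t : Int) else st.1).get? c with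
            | some k => c :: (PySem.List.pyGet? st.2 (k + 1)).getD []
            | none => [c]) = pvCand (cs.drop t) c := by
          rw [hnxt' c]
          unfold pvCand
          cases h : (cs.drop t).idxOf? c with
          | none => rfl
          | some j =>
            rcases List.idxOf?_eq_some_iff.mp h with ⟨hj, _, _⟩
            rw [List.length_drop] at hj
            simp only [Option.map_some]
            have hcast : (((t + j : Nat) : Int) + 1) = (((t + j + 1 : Nat) : Nat) : Int) := by push_cast; ring
            rw [hcast, PySem.List.pyGet?_natCast]
            have hread : st.2[t + j + 1]?.getD [] = pvSpec (cs.drop (t + j + 1)) := by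
              rw [← List.getD_eq_getElem?_getD]
              exact hdp (t + j + 1) (by omega) (by omega)
            rw [hread, List.drop_drop]
            have : t + (j + 1) = t + j + 1 := by omega
            rw [this]
        rw [hcand]
      have := List.foldl_ext _ _ ([] : List Char) hfun
      rw [this]
      exact pvIsMin_unique
        (pvFoldMin (pvCand (cs.drop t)) (pvCand_ne_nil (cs.drop t)) pvAlpha (by decide))
        (pvSpec_isMin (cs.drop t))
    -- one loop step writes that value at position t
    have hstep : pvBStep cs st (t : Int) =
        ((if (t : Int) < (cs.length : Int) then st.1.insert ((PySem.List.pyGet? cs (t : Int)).getD ' ') (t : Int) else st.1),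
         pvSet st.2 (t : Int)
           (pvAlpha.foldl (fun best c =>
             let cand : List Char :=
               match (if (t : Int) < (cs.length : Int) then st.1.insert ((PySem.List.pyGet? cs (t : Int)).getD ' ') (t : Int) else st.1).get? c with
               | some k => c :: (PySem.List.pyGet? st.2 (k + 1)).getD []
               | none => [c]
             if best == [] || pvKeyLt cand best then cand else best) [])) := rfl
    rw [hstep, hbest, pvSet_natCast]
    apply ih (by omega)
    · rw [List.length_set]
      exact hlen
    · exact hnxt'
    · intro k' hk1 hk2
      show (st.2.set t (pvSpec (cs.drop t))).getD k' [] = _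
      rw [getD_set]
      by_cases hkt : t = k'
      · rw [if_pos ⟨hkt, by omega⟩, hkt]
      · rw [if_neg (by omega : ¬ (t = k' ∧ t < st.2.length))]
        exact hdp k' (by omega) hk2
    · exact hk

lemma pvBFold_spec (cs : List Char) :
    (PySem.List.pyGet? (pvBFold cs).2 0).getD [] = pvSpec cs := by
  have hfold : pvBFold cs =
      (PySem.List.pyRange ((((cs.length + 1 : Nat) : Nat) : Int) - 1) (-1) (-1)).foldl (pvBStep cs)
        ((PySem.Dict.empty : PySem.Dict Char Int), List.replicate ((cs.length : Int) + 1).toNat ([] : List Char)) := by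
    unfold pvBFold
    have : ((((cs.length + 1 : Nat) : Nat) : Int) - 1) = (cs.length : Int) := by push_cast; ring
    rw [this]
    rfl
  have h := pvB_inner cs (cs.length + 1) (by omega)
    ((PySem.Dict.empty : PySem.Dict Char Int), List.replicate ((cs.length : Int) + 1).toNat ([] : List Char))
    (by rw [List.length_replicate]; omega)
    (by
      intro c
      have h1 : cs.drop (cs.length + 1) = [] := List.drop_eq_nil_of_le (by omega)
      rw [h1]
      rfl)
    (fun k hk1 hk2 => by omega)
    0 (by omega)
  rw [hfold]
  have hcast : (0 : Int) = ((0 : Nat) : Int) := rfl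
  rw [hcast, PySem.List.pyGet?_natCast, ← List.getD_eq_getElem?_getD]
  rw [h, List.drop_zero]

-- ===== VERDICT (by name: the statement is the Claim_ definition above) =====
theorem find_shortest_non_subsequence_spec : Claim_equal_find_shortest_non_subsequence := by
  intro A _
  show find_shortest_non_subsequence A = find_shortest_non_subsequence_alt A
  rw [portA_eq, portB_eq, pvRecon, pvBFold_spec]
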